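-- pv_equiv track=rewrite | github.com/gamescomputersplay/wordle | wordle_tree.py | get_valid_results
-- ===== SOURCE A (Python) =====
-- def get_valid_results(word_ns, guess_word_n, matrix):
--     ''' Return list of (answer, resulting_list) that are valid for this
--     initial list and guess
--     '''
--     answers = {i:[] for i in range(243)}
--     for n in word_ns:
--         answers[matrix[n][guess_word_n]].append(n)
--     # remove empty ones
--     out = {}
--     for answer, words in answers.items():
--         if len(words) > 0:
--             out[answer] = words
--     return out
-- ===== SOURCE B (Python) =====
-- def get_valid_results(word_ns, guess_word_n, matrix):
--     ''' Return list of (answer, resulting_list) that are valid for this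
--     initial list and guess
--     '''
--     ordered = sorted(word_ns, key=lambda n: matrix[n][guess_word_n])
--     out = {}
--     cur = None  # (pattern key, run of indices) of the current consecutive group
--     for n in ordered:
--         k = matrix[n][guess_word_n]
--         if cur is not None and cur[0] == k:
--             cur[1].append(n)
--         else:
--             if cur is not None:
--                 out[cur[0]] = cur[1]
--             cur = (k, [n])
--     if cur is not None:
--         out[cur[0]] = cur[1]
--     return out
-- ===== Notes on version B (the rewrite author's own statement) =====
-- stated objective: alternative
-- what changed: Instead of preallocating 243 append-buckets in a dict and filtering out the empty ones in a second pass, B stably sorts the indices by their pattern key and builds each group in one pass over the sorted list by flushing consecutive equal-key runs.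
import Mathlib
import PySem

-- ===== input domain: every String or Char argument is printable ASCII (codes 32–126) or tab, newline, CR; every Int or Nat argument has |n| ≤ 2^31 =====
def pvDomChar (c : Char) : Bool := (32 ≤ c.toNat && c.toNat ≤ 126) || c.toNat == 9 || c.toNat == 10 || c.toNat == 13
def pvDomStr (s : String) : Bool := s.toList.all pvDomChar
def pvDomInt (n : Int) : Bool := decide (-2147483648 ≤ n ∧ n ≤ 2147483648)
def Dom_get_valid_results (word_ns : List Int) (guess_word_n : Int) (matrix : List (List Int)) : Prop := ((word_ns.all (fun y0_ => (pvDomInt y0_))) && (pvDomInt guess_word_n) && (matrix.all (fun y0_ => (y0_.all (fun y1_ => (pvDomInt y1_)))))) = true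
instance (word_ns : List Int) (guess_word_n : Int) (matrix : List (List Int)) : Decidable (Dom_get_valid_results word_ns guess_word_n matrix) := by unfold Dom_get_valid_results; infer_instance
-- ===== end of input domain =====

-- B replaces A's 243 preallocated append-buckets plus a second emptiness-filtering pass by a
-- stable sort on the pattern key followed by one pass grouping consecutive equal-key runs
-- (different algorithm, same exact result; not faster).

-- matrix[n][guess_word_n] — exact under Pre_ (both lookups succeed there); -1 is never used inside Pre_
def gvKey (guess_word_n : Int) (matrix : List (List Int)) (n : Int) : Int :=
  (PySem.List.pyGet? ((PySem.List.pyGet? matrix n).getD []) guess_word_n).getD (-1)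

-- ===== PORT A =====
def get_valid_results (word_ns : List Int) (guess_word_n : Int) (matrix : List (List Int)) : List (Int × List Int) :=
  -- answers = {i: [] for i in range(243)}
  let answers : PySem.Dict Int (List Int) :=
    (PySem.List.pyRange 0 243 1).foldl (fun d i => d.insert i []) PySem.Dict.empty
  -- for n in word_ns: answers[matrix[n][guess_word_n]].append(n)
  let answers2 := word_ns.foldl
    (fun d n => d.modify (gvKey guess_word_n matrix n) [] (fun ws => ws ++ [n])) answers
  -- out = {}; for answer, words in answers.items(): if len(words) > 0: out[answer] = words
  let out : PySem.Dict Int (List Int) :=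
    answers2.items.foldl (fun o p => if 0 < p.2.length then o.insert p.1 p.2 else o) PySem.Dict.empty
  out.items

-- ===== PORT B =====
-- loop body of B: cur is the current consecutive run (pattern key, indices); a key change flushes it
def gvLoop (key : Int → Int) (st : PySem.Dict Int (List Int) × Option (Int × List Int)) (n : Int) :
    PySem.Dict Int (List Int) × Option (Int × List Int) :=
  let k := key n
  match st.2 with
  | some (ck, run) =>
    if ck == k then (st.1, some (ck, run ++ [n]))
    else (st.1.insert ck run, some (k, [n]))
  | none => (st.1, some (k, [n]))

-- the trailing 'if cur is not None: out[cur[0]] = cur[1]; return out'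
def gvFinish (st : PySem.Dict Int (List Int) × Option (Int × List Int)) : List (Int × List Int) :=
  (match st.2 with
   | some (ck, run) => st.1.insert ck run
   | none => st.1).items

def get_valid_results_alt (word_ns : List Int) (guess_word_n : Int) (matrix : List (List Int)) : List (Int × List Int) :=
  -- ordered = sorted(word_ns, key=lambda n: matrix[n][guess_word_n])
  let ordered := PySem.List.sorted word_ns (fun n => gvKey guess_word_n matrix n) false
  -- out = {}; cur = None; for n in ordered: …
  gvFinish (ordered.foldl (gvLoop (fun n => gvKey guess_word_n matrix n)) (PySem.Dict.empty, none))

-- ===== PRECONDITION & SPEC =====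
-- the lookups matrix[n] and matrix[n][guess_word_n] succeed and the value is one of the 243 preallocated keys
def gvOkB (guess_word_n : Int) (matrix : List (List Int)) (n : Int) : Bool :=
  match PySem.List.pyGet? matrix n with
  | none => false
  | some row =>
    match PySem.List.pyGet? row guess_word_n with
    | none => false
    | some v => decide (0 ≤ v ∧ v < 243)

-- Pre_ excludes exactly the inputs where A raises: an IndexError on matrix[n] or matrix[n][guess_word_n],
-- or a KeyError because matrix[n][guess_word_n] is outside range(243).
def Pre_get_valid_results (word_ns : List Int) (guess_word_n : Int) (matrix : List (List Int)) : Prop :=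
  word_ns.all (fun n => gvOkB guess_word_n matrix n) = true
instance (word_ns : List Int) (guess_word_n : Int) (matrix : List (List Int)) : Decidable (Pre_get_valid_results word_ns guess_word_n matrix) := by unfold Pre_get_valid_results; infer_instance

def pvWitness_get_valid_results : List Int × Int × List (List Int) := ([0, 1, 2], 0, [[5], [7], [5]])

def Spec_get_valid_results (word_ns : List Int) (guess_word_n : Int) (matrix : List (List Int)) (out : List (Int × List Int)) : Prop := out = get_valid_results_alt word_ns guess_word_n matrix
instance (word_ns : List Int) (guess_word_n : Int) (matrix : List (List Int)) (out : List (Int × List Int)) : Decidable (Spec_get_valid_results word_ns guess_word_n matrix out) := by unfold Spec_get_valid_results; infer_instance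

-- ===== CLAIM (what is proved, stated in full; the proofs are below) =====
def Claim_equal_get_valid_results : Prop := ∀ (word_ns : List Int) (guess_word_n : Int) (matrix : List (List Int)), Dom_get_valid_results word_ns guess_word_n matrix → Pre_get_valid_results word_ns guess_word_n matrix → Spec_get_valid_results word_ns guess_word_n matrix (get_valid_results word_ns guess_word_n matrix)


-- ===== LEMMAS AND PROOFS =====

-- the conditional dict-building loop A ends with: items of {k: v for (k,v) in l if P} for fresh keys
theorem items_condInsert {β : Type} (P : β → Bool) (k : β → Int) (v : β → List Int) (l : List β)
    (h : (l.map k).Nodup) :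
    (l.foldl (fun o a => if P a then o.insert (k a) (v a) else o)
        (PySem.Dict.empty : PySem.Dict Int (List Int))).items
      = (l.filter P).map (fun a => (k a, v a)) := by
  rw [← List.foldl_filter]
  rw [PySem.Dict.items_foldl_insert_fresh (l.filter P) k v _
      (fun a _ => PySem.Dict.contains_empty _)
      (h.sublist ((List.filter_sublist (p := P) (l := l)).map k))]
  simp [PySem.Dict.empty]

theorem gvKey_bounds {guess_word_n : Int} {matrix : List (List Int)} {n : Int}
    (h : gvOkB guess_word_n matrix n = true) :
    0 ≤ gvKey guess_word_n matrix n ∧ gvKey guess_word_n matrix n < 243 := by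
  unfold gvOkB gvKey at *
  cases hm : PySem.List.pyGet? matrix n with
  | none => simp [hm] at h
  | some row =>
    cases hr : PySem.List.pyGet? row guess_word_n with
    | none => simp [hm, hr] at h
    | some val => simp [hm, hr] at h ⊢; exact h

-- ---- generic list facts used by the B-side proof ----

theorem insertBy_passthrough {α : Type} (before : α → α → Bool) (x : α) (as bs : List α)
    (h : ∀ a ∈ as, before x a = false) :
    PySem.List.insertBy before x (as ++ bs) = as ++ PySem.List.insertBy before x bs := by
  induction as with
  | nil => simp
  | cons a as ih =>
    simp only [List.cons_append, PySem.List.insertBy, h a (by simp)]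
    simp only [Bool.false_eq_true, if_false, List.cons.injEq, true_and]
    exact ih (fun a ha => h a (by simp [ha]))

theorem insertBy_front {α : Type} (before : α → α → Bool) (x : α) (l : List α)
    (h : ∀ a ∈ l, before x a = true) :
    PySem.List.insertBy before x l = x :: l := by
  cases l with
  | nil => rfl
  | cons a l => simp [PySem.List.insertBy, h a (by simp)]

theorem flatMap_filter_ne_nil {α : Type} (f : Int → List α) (l : List Int) :
    l.flatMap f = (l.filter (fun i => f i ≠ [])).flatMap f := by
  induction l with
  | nil => rfl
  | cons i l ih =>
    by_cases h : f i = [] <;> simp [h, ih]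

-- inserting x into a key-ordered concatenation of key-homogeneous fibers appends x to its fiber
theorem insertBy_flatMap (key : Int → Int) (x : Int) :
    ∀ (ks : List Int), ks.Pairwise (· < ·) → key x ∈ ks →
    ∀ (fib : Int → List Int), (∀ i ∈ ks, ∀ n ∈ fib i, key n = i) →
    PySem.List.insertBy (fun a b => decide (key a < key b)) x (ks.flatMap fib)
      = ks.flatMap (fun i => fib i ++ if key x == i then [x] else []) := by
  intro ks
  induction ks with
  | nil => intro _ hx; simp at hx
  | cons i ks ih =>
    intro hp hx fib hfib
    have hlt : ∀ b ∈ ks, i < b := fun b hb => (List.pairwise_cons.mp hp).1 b hb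
    have hfib_i : ∀ n ∈ fib i, key n = i := hfib i (by simp)
    by_cases hxi : key x = i
    · -- x belongs to the head fiber: pass through fib i, then insert at the front of the rest
      subst hxi
      rw [List.flatMap_cons, insertBy_passthrough _ _ _ _
          (fun a ha => by simp [hfib_i a ha])]
      rw [insertBy_front _ _ _ (fun a ha => by
        obtain ⟨j, hj, haj⟩ := List.mem_flatMap.mp ha
        have := hfib j (by simp [hj]) a haj
        simp [this]; exact hlt j hj)]
      have hrest : ks.flatMap (fun i' => fib i' ++ if key x == i' then [x] else [])
          = ks.flatMap fib := by
        refine List.flatMap_congr (fun j hj => ?_)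
        have : key x ≠ j := by have := hlt j hj; omega
        simp [this]
      simp only [List.flatMap_cons, hrest, beq_self_eq_true, if_true, List.append_assoc,
        List.singleton_append]
    · -- x belongs to a later fiber: pass through fib i and recurse
      have hx' : key x ∈ ks := by
        cases List.mem_cons.mp hx with
        | inl h => exact absurd h hxi
        | inr h => exact h
      have hxgt : i < key x := hlt _ hx'
      rw [List.flatMap_cons, insertBy_passthrough _ _ _ _
          (fun a ha => by simp [hfib_i a ha]; omega)]
      rw [ih (List.pairwise_cons.mp hp).2 hx' fib (fun j hj => hfib j (by simp [hj]))]
      have hne : key x ≠ i := hxi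
      simp [List.flatMap_cons, hne]

-- the stable sort of a list whose keys all lie in a strictly increasing ks is the
-- concatenation of its key-fibers in ks order
theorem sorted_eq_flatMap_fibers (key : Int → Int) (ks : List Int) (hks : ks.Pairwise (· < ·)) :
    ∀ (wns : List Int), (∀ n ∈ wns, key n ∈ ks) →
    PySem.List.sorted wns key false = ks.flatMap (fun i => wns.filter (fun n => key n == i)) := by
  intro wns
  induction wns using List.reverseRecOn with
  | nil => simp [PySem.List.sorted_eq_foldl_insertBy]
  | append_singleton l x ih =>
    intro hmem
    have hsort : PySem.List.sorted (l ++ [x]) key false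
        = PySem.List.insertBy (fun a b => decide (key a < key b)) x
            (PySem.List.sorted l key false) := by
      rw [PySem.List.sorted_eq_foldl_insertBy, PySem.List.sorted_eq_foldl_insertBy,
        List.foldl_append]
      rfl
    rw [hsort, ih (fun n hn => hmem n (by simp [hn]))]
    rw [insertBy_flatMap key x ks hks (hmem x (by simp))
        (fun i => l.filter (fun n => key n == i))
        (fun i _ n hn => by simpa using (List.mem_filter.mp hn).2)]
    refine List.flatMap_congr (fun i _ => ?_)
    by_cases h : key x = i <;> simp [List.filter_append, h]

-- ---- B's grouping loop over a concatenation of homogeneous runs ----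

theorem gvLoop_run (key : Int → Int) (k : Int) :
    ∀ (l : List Int), (∀ n ∈ l, key n = k) →
    ∀ (o : PySem.Dict Int (List Int)) (r : List Int),
    l.foldl (gvLoop key) (o, some (k, r)) = (o, some (k, r ++ l)) := by
  intro l
  induction l with
  | nil => intro _ o r; simp
  | cons n l ih =>
    intro h o r
    have hk : key n = k := h n (by simp)
    simp only [List.foldl_cons, gvLoop, hk, beq_self_eq_true, if_true]
    rw [ih (fun m hm => h m (by simp [hm])) o (r ++ [n])]
    simp

theorem gvLoop_enter_some (key : Int → Int) (i j : Int) (hji : j ≠ i)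
    (run : List Int) (hrun : run ≠ []) (hkeys : ∀ n ∈ run, key n = i)
    (o : PySem.Dict Int (List Int)) (r : List Int) (rest : List Int) :
    (run ++ rest).foldl (gvLoop key) (o, some (j, r))
      = rest.foldl (gvLoop key) (o.insert j r, some (i, run)) := by
  cases run with
  | nil => exact absurd rfl hrun
  | cons n0 ns =>
    have h0 : key n0 = i := hkeys n0 (by simp)
    rw [List.cons_append, List.foldl_cons]
    have hne : (j == i) = false := by simp [hji]
    simp only [gvLoop, h0, hne, Bool.false_eq_true, if_false]
    rw [List.foldl_append, gvLoop_run key i ns (fun m hm => hkeys m (by simp [hm]))]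
    simp

theorem gvLoop_enter_none (key : Int → Int) (i : Int)
    (run : List Int) (hrun : run ≠ []) (hkeys : ∀ n ∈ run, key n = i)
    (o : PySem.Dict Int (List Int)) (rest : List Int) :
    (run ++ rest).foldl (gvLoop key) (o, none)
      = rest.foldl (gvLoop key) (o, some (i, run)) := by
  cases run with
  | nil => exact absurd rfl hrun
  | cons n0 ns =>
    have h0 : key n0 = i := hkeys n0 (by simp)
    rw [List.cons_append, List.foldl_cons]
    simp only [gvLoop, h0]
    rw [List.foldl_append, gvLoop_run key i ns (fun m hm => hkeys m (by simp [hm]))]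
    simp

theorem gvGroup (key : Int → Int) :
    ∀ (K : List Int), K.Pairwise (· < ·) →
    ∀ (fib : Int → List Int), (∀ i ∈ K, fib i ≠ []) → (∀ i ∈ K, ∀ n ∈ fib i, key n = i) →
    ∀ (o : PySem.Dict Int (List Int)) (j : Int) (r : List Int), (∀ i ∈ K, j < i) →
    gvFinish ((K.flatMap fib).foldl (gvLoop key) (o, some (j, r)))
      = gvFinish (K.foldl (fun d i => d.insert i (fib i)) (o.insert j r), none) := by
  intro K
  induction K with
  | nil => intro _ fib _ _ o j r _; simp [gvFinish]
  | cons i K ih =>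
    intro hp fib hne hkeys o j r hj
    have hji : j ≠ i := by have := hj i (by simp); omega
    rw [List.flatMap_cons,
      gvLoop_enter_some key i j hji (fib i) (hne i (by simp)) (hkeys i (by simp)) o r]
    rw [ih (List.pairwise_cons.mp hp).2 fib (fun a ha => hne a (by simp [ha]))
      (fun a ha => hkeys a (by simp [ha])) (o.insert j r) i (fib i)
      (fun a ha => (List.pairwise_cons.mp hp).1 a ha)]
    simp

theorem R_eq_map : PySem.List.pyRange 0 243 1 = (List.range 243).map (fun k => (k : Int)) := by
  have := PySem.List.pyRange_zero_natCast 243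
  norm_num at this
  exact this

theorem R_pairwise : (PySem.List.pyRange 0 243 1).Pairwise (· < ·) := by
  rw [R_eq_map]
  exact List.Pairwise.map (l := List.range 243) (fun k => (k : Int))
    (fun {a b} h => by show (a : Int) < (b : Int); exact_mod_cast h) List.pairwise_lt_range

theorem get_valid_results_spec : Claim_equal_get_valid_results := by
  intro wns g m _ hpre
  unfold Spec_get_valid_results get_valid_results get_valid_results_alt
  simp only []
  set R := PySem.List.pyRange 0 243 1 with hR
  set key := gvKey g m with hkeydef
  set G : Int → List Int := fun i => wns.filter (fun n => key n == i) with hG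
  have hmem : ∀ n ∈ wns, key n ∈ R := by
    intro n hn
    have hok : gvOkB g m n = true := by
      have := (List.all_eq_true).mp hpre n hn
      simpa using this
    have hb := gvKey_bounds hok
    rw [hR]; exact PySem.List.mem_pyRange_one.mpr ⟨hb.1, hb.2⟩
  have hnodR : R.Nodup := PySem.List.nodup_pyRange_one 0 243
  -- ===== A's side: items = (R.filter (G ≠ [])).map (fun i => (i, G i)) =====
  set d1 : PySem.Dict Int (List Int) :=
    R.foldl (fun d i => d.insert i []) PySem.Dict.empty with hd1
  have h1 : d1.items = R.map (fun i => (i, ([] : List Int))) := by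
    have := PySem.Dict.items_foldl_insert_fresh R (fun i => i) (fun _ => ([] : List Int))
      PySem.Dict.empty (fun a _ => PySem.Dict.contains_empty _) (by simpa using hnodR)
    simpa [PySem.Dict.empty] using this
  have hk1 : d1.keys = R := by
    simp [PySem.Dict.keys, h1, List.map_map, Function.comp_def]
  set d2 : PySem.Dict Int (List Int) :=
    wns.foldl (fun d n => d.modify (key n) [] (fun ws => ws ++ [n])) d1 with hd2
  have hk2 : d2.keys = R := by
    rw [hd2, PySem.Dict.keys_foldl_modify_key wns key [] (fun _ n ws => ws ++ [n]) d1,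
      hk1, PySem.Set.update_eq_append_filter]
    have hnil : (PySem.Set.ofList (wns.map key)).filter
        (fun y => !(PySem.Set.contains R y)) = [] := by
      apply List.filter_eq_nil_iff.mpr
      intro y hy
      have hy' : y ∈ wns.map key := (PySem.Set.mem_ofList _ _).mp hy
      obtain ⟨n, hn, rfl⟩ := List.mem_map.mp hy'
      simp
      exact hmem n hn
    rw [hnil, List.append_nil]
  have hnod2 : d2.keys.Nodup := hk2 ▸ hnodR
  have hg1 : ∀ i ∈ R, d1.getD i [] = [] := by
    intro i hi
    exact PySem.Dict.getD_of_mem_items d1 (by rw [h1]; exact List.mem_map.mpr ⟨i, hi, rfl⟩)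
      (hk1 ▸ hnodR) []
  have hg2 : ∀ i ∈ R, d2.getD i [] = G i := by
    intro i hi
    have hfold : d2 = (wns.map (fun n => (key n, n))).foldl
        (fun d p => d.modify p.1 [] (fun x => x ++ [p.2])) d1 := by
      rw [hd2, List.foldl_map]
    rw [hfold, PySem.Dict.getD_foldl_modify_append, hg1 i hi, List.nil_append, hG,
      List.filter_map, List.map_map]
    simp [Function.comp_def]
  have h2 : d2.items = R.map (fun i => (i, G i)) := by
    rw [PySem.Dict.items_eq_map_keys d2 hnod2 [], hk2]
    exact List.map_congr_left (fun i hi => by rw [hg2 i hi])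
  have hA : (d2.items.foldl
      (fun o p => if 0 < p.2.length then o.insert p.1 p.2 else o)
      (PySem.Dict.empty : PySem.Dict Int (List Int))).items
      = d2.items.filter (fun p => decide (0 < p.2.length)) := by
    have hn : (d2.items.map Prod.fst).Nodup := hnod2
    have := items_condInsert (fun p => decide (0 < p.2.length)) Prod.fst Prod.snd d2.items hn
    simpa using this
  have hAres : (d2.items.foldl
      (fun o p => if 0 < p.2.length then o.insert p.1 p.2 else o)
      (PySem.Dict.empty : PySem.Dict Int (List Int))).items
      = (R.filter (fun i => G i ≠ [])).map (fun i => (i, G i)) := by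
    rw [hA, h2, List.filter_map]
    simp only [Function.comp_def]
    have hfc : ∀ i ∈ R, (decide (0 < (G i).length)) = decide (G i ≠ []) := by
      intro i _
      simp [List.length_pos_iff]
    rw [List.filter_congr hfc]
  -- ===== B's side =====
  set K := R.filter (fun i => G i ≠ []) with hK
  have hKpair : K.Pairwise (· < ·) := R_pairwise.sublist (List.filter_sublist)
  have hKnod : K.Nodup := hKpair.imp (fun h => Int.ne_of_lt h)
  have hKfib_ne : ∀ i ∈ K, G i ≠ [] := by
    intro i hi
    simpa using (List.mem_filter.mp hi).2
  have hKfib_keys : ∀ i ∈ K, ∀ n ∈ G i, key n = i := by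
    intro i _ n hn
    simpa using (List.mem_filter.mp hn).2
  have hsorted : PySem.List.sorted wns key false = K.flatMap G := by
    rw [sorted_eq_flatMap_fibers key R R_pairwise wns hmem, hK, hG]
    exact flatMap_filter_ne_nil G R
  have hBres : gvFinish ((PySem.List.sorted wns key false).foldl (gvLoop key)
        (PySem.Dict.empty, none))
      = (R.filter (fun i => G i ≠ [])).map (fun i => (i, G i)) := by
    rw [hsorted, ← hK]
    cases hKc : K with
    | nil => simp [gvFinish, PySem.Dict.empty]
    | cons i K' =>
      have hne := hKc ▸ hKfib_ne
      have hkeys := hKc ▸ hKfib_keys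
      have hp := hKc ▸ hKpair
      rw [List.flatMap_cons,
        gvLoop_enter_none key i (G i) (hne i (by simp)) (hkeys i (by simp)) _ _]
      have hgrp := gvGroup key K' (List.pairwise_cons.mp hp).2 G
        (fun a ha => hne a (by simp [ha])) (fun a ha => hkeys a (by simp [ha]))
        PySem.Dict.empty i (G i) (fun a ha => (List.pairwise_cons.mp hp).1 a ha)
      rw [hgrp]
      have : (K'.foldl (fun d a => d.insert a (G a)) (PySem.Dict.empty.insert i (G i)))
          = ((i :: K').foldl (fun d a => d.insert a (G a)) PySem.Dict.empty) := by
        simp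
      rw [gvFinish, this]
      have hitems := PySem.Dict.items_foldl_insert_fresh (i :: K') (fun a => a) G
        PySem.Dict.empty (fun a _ => PySem.Dict.contains_empty _)
        (by have h := hKnod; rw [hKc] at h; simpa using h)
      simp only [PySem.Dict.empty] at hitems ⊢
      rw [hitems]
      simp
  rw [hAres, ← hBres]
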